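-- pv_equiv track=rewrite | github.com/angelhort/platypus | converter/textbook-converter/textbook_converter/TextbookExporter.py | handle_inline_latex
-- ===== SOURCE A (Python) =====
-- def handle_inline_latex(line):
--     """Escape \{ and \} in inline equations"""
--     if "$" not in line:
--         return line
--     newline = ""
--     in_latex = False
--     for text in line.split("$"):
--         if in_latex:
--             text = text.replace(r"\{", r"\\{")
--             text = text.replace(r"\}", r"\\}")
--         newline += text + "$"
--         in_latex = not in_latex
--     return newline[:-1]
-- ===== SOURCE B (Python) =====
-- def handle_inline_latex(line):
--     """Escape \{ and \} in inline equations (single left-to-right pass)."""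
--     out = []
--     in_latex = False
--     i = 0
--     n = len(line)
--     while i < n:
--         c = line[i]
--         if c == "$":
--             in_latex = not in_latex
--             out.append(c)
--             i += 1
--         elif in_latex and c == "\\" and i + 1 < n and line[i + 1] in "{}":
--             out.append("\\\\" + line[i + 1])
--             i += 2
--         else:
--             out.append(c)
--             i += 1
--     return "".join(out)
-- ===== Notes on version B (the rewrite author's own statement) =====
-- stated objective: alternative
-- what changed: Replaces A's split-on-dollar-sign plus two str.replace passes per segment (re-joined and sliced) by a single left-to-right character scan that toggles an in_latex flag at each delimiter and escapes backslash-brace pairs in place.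
import Mathlib
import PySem

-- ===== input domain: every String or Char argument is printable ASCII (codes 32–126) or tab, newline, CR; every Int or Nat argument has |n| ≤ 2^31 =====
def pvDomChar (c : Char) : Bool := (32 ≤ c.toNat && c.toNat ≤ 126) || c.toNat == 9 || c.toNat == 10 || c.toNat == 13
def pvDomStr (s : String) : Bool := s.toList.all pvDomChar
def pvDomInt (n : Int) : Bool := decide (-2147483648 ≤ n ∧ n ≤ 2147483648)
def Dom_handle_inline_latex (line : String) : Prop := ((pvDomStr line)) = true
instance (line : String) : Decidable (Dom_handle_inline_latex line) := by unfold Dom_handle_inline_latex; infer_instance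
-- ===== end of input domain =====

-- B replaces A's split-on-'$' + per-segment str.replace passes by one left-to-right
-- character scan with an in_latex toggle (alternative decomposition, same cost).


-- ===== PORT A =====
-- text.replace("\{", "\\{").replace-like helper: the two replace calls of A's loop body
def pvReplA (text : List Char) : List Char :=
  PySem.Chars.replace (PySem.Chars.replace text ['\\', '{'] ['\\', '\\', '{'])
    ['\\', '}'] ['\\', '\\', '}']

def handle_inline_latex (line : String) : String :=
  if PySem.Str.isIn "$" line = false then line
  else
    let r := (PySem.Chars.splitOn line.toList ['$']).foldl
      (fun st text =>
        let text := if st.2 then pvReplA text else text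
        (st.1 ++ text ++ ['$'], !st.2))
      ([], false)
    String.ofList (PySem.Chars.slice r.1 none (some (-1)))

-- ===== PORT B =====
-- B's while loop over indices, as the obvious structural recursion over the characters
def pvGoB : Bool → List Char → List Char
  | _, [] => []
  | b, [c] => if c = '$' then ['$'] else [c]
  | b, c :: d :: t' =>
    if c = '$' then '$' :: pvGoB (!b) (d :: t')
    else if b && (c = '\\') && (d = '{' || d = '}') then '\\' :: '\\' :: d :: pvGoB b t'
    else c :: pvGoB b (d :: t')

def handle_inline_latex_alt (line : String) : String :=
  String.ofList (pvGoB false line.toList)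

-- ===== PRECONDITION & SPEC =====
def Spec_handle_inline_latex (line : String) (out : String) : Prop := out = handle_inline_latex_alt line
instance (line : String) (out : String) : Decidable (Spec_handle_inline_latex line out) := by unfold Spec_handle_inline_latex; infer_instance

-- ===== CLAIM (what is proved, stated in full; the proofs are below) =====
def Claim_equal_handle_inline_latex : Prop := ∀ (line : String), Dom_handle_inline_latex line → Spec_handle_inline_latex line (handle_inline_latex line)

-- ===== LEMMAS AND PROOFS =====

-- str.split('$') as a structural recursion
def pvSpl : List Char → List (List Char)
  | [] => [[]]
  | c :: t =>
    if c = '$' then [] :: pvSpl t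
    else
      match pvSpl t with
      | [] => [[c]]
      | x :: xs => (c :: x) :: xs

-- one replace pass escaping '\br'
def pvEscB (br : Char) : List Char → List Char
  | [] => []
  | [c] => [c]
  | c :: d :: t =>
    if c = '\\' ∧ d = br then '\\' :: '\\' :: br :: pvEscB br t
    else c :: pvEscB br (d :: t)

-- both replace passes at once
def pvEsc : List Char → List Char
  | [] => []
  | [c] => [c]
  | c :: d :: t =>
    if c = '\\' ∧ (d = '{' ∨ d = '}') then '\\' :: '\\' :: d :: pvEsc t
    else c :: pvEsc (d :: t)

-- A's joined result (alternating segments, '$' between)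
def pvJoin : Bool → List (List Char) → List Char
  | _, [] => []
  | b, x :: xs =>
    (if b then pvEsc x else x) ++ (if xs.isEmpty then [] else '$' :: pvJoin (!b) xs)

theorem pvSpl_ne_nil (l : List Char) : pvSpl l ≠ [] := by
  cases l with
  | nil => simp [pvSpl]
  | cons c t =>
    simp only [pvSpl]
    split_ifs
    · simp
    · cases h : pvSpl t <;> simp

theorem pvSpl_cons_list (l : List Char) : ∃ x xs, pvSpl l = x :: xs := by
  cases hh : pvSpl l with
  | nil => exact absurd hh (pvSpl_ne_nil l)
  | cons x xs => exact ⟨x, xs, rfl⟩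

theorem pvSpl_cons_dollar (t : List Char) : pvSpl ('$' :: t) = [] :: pvSpl t := by
  simp [pvSpl]

theorem pvSpl_cons_ne {c : Char} {t x : List Char} {xs : List (List Char)}
    (hc : c ≠ '$') (hx : pvSpl t = x :: xs) : pvSpl (c :: t) = (c :: x) :: xs := by
  simp [pvSpl, hc, hx]

theorem pvEscB_cons (br c : Char) (l : List Char) (h : c ≠ '\\') :
    pvEscB br (c :: l) = c :: pvEscB br l := by
  cases l with
  | nil => simp [pvEscB]
  | cons d t => simp [pvEscB, h]

theorem pvEsc_cons (c : Char) (l : List Char) (h : c ≠ '\\') :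
    pvEsc (c :: l) = c :: pvEsc l := by
  cases l with
  | nil => simp [pvEsc]
  | cons d t => simp [pvEsc, h]

theorem pvEscB_head (br c : Char) (l : List Char) :
    ∃ r, pvEscB br (c :: l) = c :: r := by
  cases l with
  | nil => exact ⟨[], by simp [pvEscB]⟩
  | cons d t =>
    by_cases h : c = '\\' ∧ d = br
    · exact ⟨'\\' :: br :: pvEscB br t, by simp [pvEscB, h.1, h.2]⟩
    · exact ⟨pvEscB br (d :: t), by simp [pvEscB, h]⟩

-- replace.go, characterized
theorem pvReplGo (br : Char) : ∀ (fuel : Nat) (l acc : List Char), l.length ≤ fuel →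
    PySem.Chars.replace.go ['\\', br] ['\\', '\\', br] fuel l acc
      = acc.reverse ++ pvEscB br l := by
  intro fuel
  induction fuel with
  | zero =>
    intro l acc h
    have : l = [] := by cases l <;> simp_all
    subst this
    simp [PySem.Chars.replace.go, pvEscB]
  | succ f ih =>
    intro l acc h
    cases l with
    | nil => simp [PySem.Chars.replace.go, pvEscB]
    | cons c t =>
      cases t with
      | nil =>
        have hp : ((['\\', br] : List Char).isPrefixOf [c]) = false := by
          simp [List.isPrefixOf]
        simp only [PySem.Chars.replace.go, hp, Bool.false_eq_true, if_false]
        rw [ih [] (c :: acc) (by simp)]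
        simp [pvEscB]
      | cons d t' =>
        by_cases hc : c = '\\' ∧ d = br
        · obtain ⟨rfl, rfl⟩ := hc
          have hp : (['\\', d].isPrefixOf ('\\' :: d :: t')) = true := by
            simp [List.isPrefixOf]
          simp only [PySem.Chars.replace.go, hp, if_pos]
          rw [show ('\\' :: d :: t').drop ((['\\', d] : List Char).length) = t' from rfl]
          rw [ih t' (['\\', '\\', d].reverse ++ acc) (by simp at h ⊢; omega)]
          simp [pvEscB]
        · have hp : ((['\\', br] : List Char).isPrefixOf (c :: d :: t')) = false := by
            by_cases h1 : c = '\\'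
            · subst h1
              by_cases h2 : d = br
              · exact absurd ⟨rfl, h2⟩ hc
              · simp [List.isPrefixOf]
                exact fun hh => h2 hh.symm
            · simp [List.isPrefixOf]
              exact fun hcc => (h1 hcc.symm).elim
          simp only [PySem.Chars.replace.go, hp, Bool.false_eq_true, if_false]
          rw [ih (d :: t') (c :: acc) (by simp at h ⊢; omega)]
          simp [pvEscB, hc]

theorem pvRepl_eq (br : Char) (l : List Char) :
    PySem.Chars.replace l ['\\', br] ['\\', '\\', br] = pvEscB br l := by
  simp only [PySem.Chars.replace]
  rw [if_neg (by simp)]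
  simpa using pvReplGo br l.length l [] (le_refl _)

-- the two replace passes compose to the single-pass escape
theorem pvEscB_comp : ∀ (n : Nat) (l : List Char), l.length ≤ n →
    pvEscB '}' (pvEscB '{' l) = pvEsc l := by
  intro n
  induction n with
  | zero =>
    intro l h
    have : l = [] := by cases l <;> simp_all
    subst this; simp [pvEscB, pvEsc]
  | succ n ih =>
    intro l h
    match l with
    | [] => simp [pvEscB, pvEsc]
    | [c] => simp [pvEscB, pvEsc]
    | c :: d :: t =>
      simp only [List.length_cons] at h
      by_cases hc : c = '\\'
      · subst hc
        by_cases hd1 : d = '{'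
        · subst hd1
          rw [show pvEscB '{' ('\\' :: '{' :: t) = '\\' :: '\\' :: '{' :: pvEscB '{' t from by
            simp [pvEscB]]
          rw [show pvEscB '}' ('\\' :: '\\' :: '{' :: pvEscB '{' t)
              = '\\' :: pvEscB '}' ('\\' :: '{' :: pvEscB '{' t) from by simp [pvEscB]]
          rw [show pvEscB '}' ('\\' :: '{' :: pvEscB '{' t)
              = '\\' :: pvEscB '}' ('{' :: pvEscB '{' t) from by simp [pvEscB]]
          rw [pvEscB_cons '}' '{' _ (by decide)]
          rw [ih t (by omega)]
          simp [pvEsc]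
        · by_cases hd2 : d = '}'
          · subst hd2
            rw [show pvEscB '{' ('\\' :: '}' :: t) = '\\' :: pvEscB '{' ('}' :: t) from by
              simp [pvEscB, hd1]]
            rw [pvEscB_cons '{' '}' t (by decide)]
            rw [show pvEscB '}' ('\\' :: '}' :: pvEscB '{' t)
                = '\\' :: '\\' :: '}' :: pvEscB '}' (pvEscB '{' t) from by simp [pvEscB]]
            rw [ih t (by omega)]
            simp [pvEsc]
          · -- c = '\\', d not a brace
            rw [show pvEscB '{' ('\\' :: d :: t) = '\\' :: pvEscB '{' (d :: t) from by
              simp [pvEscB, hd1]]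
            by_cases hdb : d = '\\'
            · subst hdb
              obtain ⟨r, hr⟩ := pvEscB_head '{' '\\' t
              rw [hr]
              rw [show pvEscB '}' ('\\' :: '\\' :: r) = '\\' :: pvEscB '}' ('\\' :: r) from by
                simp [pvEscB]]
              rw [← hr, ih ('\\' :: t) (by simp; omega)]
              simp [pvEsc, hd1, hd2]
            · rw [pvEscB_cons '{' d t hdb]
              rw [show pvEscB '}' ('\\' :: d :: pvEscB '{' t)
                  = '\\' :: pvEscB '}' (d :: pvEscB '{' t) from by simp [pvEscB, hd2]]
              rw [pvEscB_cons '}' d _ hdb]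
              rw [ih t (by omega)]
              rw [show pvEsc ('\\' :: d :: t) = '\\' :: pvEsc (d :: t) from by
                simp [pvEsc, hd1, hd2]]
              rw [pvEsc_cons d t hdb]
      · rw [pvEscB_cons '{' c _ hc, pvEscB_cons '}' c _ hc]
        rw [ih (d :: t) (by simp; omega)]
        rw [show pvEsc (c :: d :: t) = c :: pvEsc (d :: t) from by simp [pvEsc, hc]]

theorem pvReplA_eq (l : List Char) : pvReplA l = pvEsc l := by
  simp only [pvReplA, pvRepl_eq]
  exact pvEscB_comp l.length l (le_refl _)

-- split('$'), characterized
theorem pvSplGo : ∀ (fuel : Nat) (l cur : List Char) (acc : List (List Char)),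
    l.length ≤ fuel →
    PySem.Chars.splitOn.go ['$'] fuel l cur acc
      = acc.reverse ++ (match pvSpl l with
        | [] => [cur.reverse]
        | x :: xs => (cur.reverse ++ x) :: xs) := by
  intro fuel
  induction fuel with
  | zero =>
    intro l cur acc h
    have : l = [] := by cases l <;> simp_all
    subst this
    simp [PySem.Chars.splitOn.go, pvSpl]
  | succ f ih =>
    intro l cur acc h
    cases l with
    | nil => simp [PySem.Chars.splitOn.go, pvSpl]
    | cons c t =>
      simp only [List.length_cons] at h
      by_cases hc : c = '$'
      · subst hc
        have hp : (['$'].isPrefixOf ('$' :: t)) = true := by simp [List.isPrefixOf]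
        simp only [PySem.Chars.splitOn.go, hp, if_pos]
        rw [show ('$' :: t).drop ((['$'] : List Char).length) = t from rfl]
        rw [ih t [] (cur.reverse :: acc) (by omega)]
        obtain ⟨x, xs, hx⟩ := pvSpl_cons_list t
        simp [pvSpl_cons_dollar, hx]
      · have hp : (['$'].isPrefixOf (c :: t)) = false := by
          simp [List.isPrefixOf]
          exact fun hh => hc hh.symm
        simp only [PySem.Chars.splitOn.go, hp, Bool.false_eq_true, if_false]
        rw [ih t (c :: cur) acc (by omega)]
        obtain ⟨x, xs, hx⟩ := pvSpl_cons_list t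
        simp [pvSpl_cons_ne hc hx, hx]

theorem pvSplitOn_eq (l : List Char) : PySem.Chars.splitOn l ['$'] = pvSpl l := by
  simp only [PySem.Chars.splitOn]
  rw [pvSplGo (l.length + 1) l [] [] (by omega)]
  obtain ⟨x, xs, hx⟩ := pvSpl_cons_list l
  simp [hx]

-- shape of the first segment of pvSpl
theorem pvSpl_head (t : List Char) (x : List Char) (xs : List (List Char))
    (h : pvSpl t = x :: xs) :
    x = [] ∨ ∃ d t' x', t = d :: t' ∧ d ≠ '$' ∧ x = d :: x' := by
  cases t with
  | nil => left; simp [pvSpl] at h; exact h.1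
  | cons d t' =>
    by_cases hd : d = '$'
    · left; subst hd; rw [pvSpl_cons_dollar] at h; exact (List.cons.injEq _ _ _ _ ▸ h).1.symm
    · right
      obtain ⟨y, ys, hy⟩ := pvSpl_cons_list t'
      rw [pvSpl_cons_ne hd hy] at h
      exact ⟨d, t', y, rfl, hd, (List.cons.injEq _ _ _ _ ▸ h).1.symm⟩

theorem pvGoB_dollar (b : Bool) (t : List Char) :
    pvGoB b ('$' :: t) = '$' :: pvGoB (!b) t := by
  cases t <;> simp [pvGoB]

-- B's scan equals A's alternating join of the split
theorem pvGoB_join : ∀ (n : Nat) (l : List Char), l.length ≤ n → ∀ b,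
    pvGoB b l = pvJoin b (pvSpl l) := by
  intro n
  induction n with
  | zero =>
    intro l h b
    have : l = [] := by cases l <;> simp_all
    subst this; simp [pvGoB, pvSpl, pvJoin, pvEsc]
  | succ n ih =>
    intro l h b
    cases l with
    | nil => simp [pvGoB, pvSpl, pvJoin, pvEsc]
    | cons c t =>
      simp only [List.length_cons] at h
      by_cases hc : c = '$'
      · subst hc
        obtain ⟨x, xs, hx⟩ := pvSpl_cons_list t
        rw [pvGoB_dollar, pvSpl_cons_dollar, ih t (by omega) (!b), hx]
        simp [pvJoin, pvEsc]
      · cases t with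
        | nil => simp [pvGoB, pvSpl, hc, pvJoin, pvEsc]
        | cons d t' =>
          obtain ⟨x, xs, hx⟩ := pvSpl_cons_list (d :: t')
          have hspl : pvSpl (c :: d :: t') = (c :: x) :: xs := pvSpl_cons_ne hc hx
          by_cases hb : b = true ∧ c = '\\' ∧ (d = '{' ∨ d = '}')
          · obtain ⟨rfl, rfl, hd⟩ := hb
            have hd' : d ≠ '$' := by rcases hd with rfl | rfl <;> decide
            obtain ⟨x', xs', hx'⟩ := pvSpl_cons_list t'
            have hx2 : pvSpl (d :: t') = (d :: x') :: xs' := pvSpl_cons_ne hd' hx'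
            have hspl' : pvSpl ('\\' :: d :: t') = ('\\' :: d :: x') :: xs' :=
              pvSpl_cons_ne (by decide) hx2
            rw [show pvGoB true ('\\' :: d :: t') = '\\' :: '\\' :: d :: pvGoB true t' from by
              rcases hd with rfl | rfl <;> simp [pvGoB]]
            rw [ih t' (by simp at h; omega) true, hx', hspl']
            simp only [pvJoin]
            rw [show pvEsc ('\\' :: d :: x') = '\\' :: '\\' :: d :: pvEsc x' from by
              simp [pvEsc, hd]]
            simp
          · have hstep : pvGoB b (c :: d :: t') = c :: pvGoB b (d :: t') := by
              rcases Bool.eq_false_or_eq_true b with hb' | hb'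
              case inr => subst hb'; simp [pvGoB, hc]
              case inl =>
                subst hb'
                have h2 : ¬ (c = '\\' ∧ (d = '{' ∨ d = '}')) := fun hh => hb ⟨rfl, hh⟩
                by_cases h3 : c = '\\'
                · subst h3
                  have h4a : d ≠ '{' := fun hh => h2 ⟨rfl, Or.inl hh⟩
                  have h4b : d ≠ '}' := fun hh => h2 ⟨rfl, Or.inr hh⟩
                  simp [pvGoB, hc, h4a, h4b]
                · simp [pvGoB, hc, h3]
            rw [hstep, ih (d :: t') (by simp at h ⊢; omega) b, hx, hspl]
            simp only [pvJoin]
            have hseg : (if b then pvEsc (c :: x) else c :: x)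
                = c :: (if b then pvEsc x else x) := by
              rcases Bool.eq_false_or_eq_true b with hb' | hb'
              case inr => subst hb'; simp
              case inl =>
                subst hb'
                simp only [if_pos]
                rcases pvSpl_head (d :: t') x xs hx with rfl | ⟨e, t'', x', het, he, rfl⟩
                · simp [pvEsc]
                · have hed : e = d := (List.cons.injEq _ _ _ _ ▸ het).1.symm
                  subst hed
                  have h2 : ¬ (c = '\\' ∧ (e = '{' ∨ e = '}')) := fun hh => hb ⟨rfl, hh⟩
                  simp [pvEsc, h2]
            rw [hseg]
            simp

-- the foldl of A over nonempty segments
theorem pvFoldl (xs : List (List Char)) : ∀ (x : List Char) (acc : List Char) (b : Bool),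
    ((x :: xs).foldl
      (fun st text =>
        let text := if st.2 then pvReplA text else text
        (st.1 ++ text ++ ['$'], !st.2))
      (acc, b)).1 = acc ++ pvJoin b (x :: xs) ++ ['$'] := by
  induction xs with
  | nil =>
    intro x acc b
    simp [pvJoin, pvReplA_eq]
  | cons y ys ih =>
    intro x acc b
    have h1 := ih y (acc ++ (if b = true then pvReplA x else x) ++ ['$']) (!b)
    simp only [List.foldl_cons] at h1 ⊢
    exact h1.trans (by simp [pvJoin, pvReplA_eq, List.append_assoc])

theorem pvSpl_noDollar (l : List Char) (h : '$' ∉ l) : pvSpl l = [l] := by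
  induction l with
  | nil => simp [pvSpl]
  | cons c t ih =>
    simp only [List.mem_cons, not_or] at h
    rw [pvSpl_cons_ne (Ne.symm h.1) (ih h.2)]

-- ===== VERDICT (by name: the statement is the Claim_ definition above) =====
theorem handle_inline_latex_spec : Claim_equal_handle_inline_latex := by
  intro line _
  unfold Spec_handle_inline_latex handle_inline_latex handle_inline_latex_alt
  by_cases hin : PySem.Str.isIn "$" line = false
  · rw [if_pos hin]
    have hmem : '$' ∉ line.toList := by
      intro hm
      have hinf : (['$'] : List Char) <:+: line.toList := by
        obtain ⟨s1, s2, hsp⟩ := List.append_of_mem hm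
        exact ⟨s1, s2, by simp [hsp]⟩
      have h2 : PySem.Chars.isIn ['$'] line.toList = false := by simpa using hin
      rw [PySem.Chars.isIn_eq_false_iff] at h2
      exact h2 hinf
    rw [pvGoB_join line.toList.length line.toList (le_refl _) false,
      pvSpl_noDollar _ hmem]
    simp only [pvJoin, if_neg (Bool.false_ne_true), List.isEmpty_nil, if_true,
      List.append_nil]
    exact String.ofList_toList.symm
  · rw [if_neg hin]
    simp only [pvSplitOn_eq]
    obtain ⟨x, xs, hx⟩ := pvSpl_cons_list line.toList
    rw [hx, pvFoldl xs x [] false]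
    rw [show PySem.Chars.slice ([] ++ pvJoin false (x :: xs) ++ ['$']) none (some (-1))
        = pvJoin false (x :: xs) from by
      simp [PySem.Chars.slice_eq_listSlice, PySem.List.slice_to_neg_one]]
    rw [pvGoB_join line.toList.length line.toList (le_refl _) false, hx]
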